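-- pv_equiv track=rewrite | github.com/johnwroge/DSA | Algorithms/greedy-algorithms/huffman-coding.py | is_valid_huffman_code
-- ===== SOURCE A (Python) =====
-- def is_valid_huffman_code(codes):
--     """
--     Check if given codes form a valid Huffman code (prefix property)
--     """
--     if not codes:
--         return True
--
--     code_list = list(codes.values())
--
--     # Check prefix property
--     for i in range(len(code_list)):
--         for j in range(len(code_list)):
--             if i != j and code_list[i].startswith(code_list[j]):
--                 return False
--
--     return True
-- ===== SOURCE B (Python) =====
-- def is_valid_huffman_code(codes):
--     """
--     Check if given codes form a valid Huffman code (prefix property)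
--     """
--     vals = sorted(codes.values())
--     return all(not b.startswith(a) for a, b in zip(vals, vals[1:]))
-- ===== Notes on version B (the rewrite author's own statement) =====
-- stated objective: alternative
-- what changed: A compares every ordered pair of codes with startswith (all-pairs double loop with early exit); B instead sorts the codes lexicographically once and tests only adjacent pairs for the prefix relation.
import Mathlib
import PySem

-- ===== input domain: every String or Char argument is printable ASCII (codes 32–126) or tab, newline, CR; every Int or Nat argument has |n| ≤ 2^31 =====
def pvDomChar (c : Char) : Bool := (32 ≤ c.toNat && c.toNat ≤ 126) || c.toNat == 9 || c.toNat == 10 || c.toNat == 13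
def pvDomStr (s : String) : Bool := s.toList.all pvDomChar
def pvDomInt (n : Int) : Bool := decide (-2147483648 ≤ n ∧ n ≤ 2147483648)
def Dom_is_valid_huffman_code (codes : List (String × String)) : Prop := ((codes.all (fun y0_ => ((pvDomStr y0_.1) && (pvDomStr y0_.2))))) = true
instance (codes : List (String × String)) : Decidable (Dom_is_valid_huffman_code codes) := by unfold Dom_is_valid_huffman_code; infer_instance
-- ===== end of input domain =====

-- B replaces A's all-pairs nested prefix scan by sort-then-check-adjacent-pairs; return values proved equal.

-- ===== PORT A =====
-- literal port of A: the early-exit nested for-loops over range(len(code_list)) rendered as `any`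
def is_valid_huffman_code (codes : List (String × String)) : Bool :=
  if codes = [] then true
  else
    let code_list := codes.map (fun kv => kv.2)
    if (PySem.List.pyRange 0 (PySem.List.len code_list) 1).any (fun i =>
         (PySem.List.pyRange 0 (PySem.List.len code_list) 1).any (fun j =>
           decide (i ≠ j) && PySem.Str.startswith (PySem.List.pyGetD code_list i "")
             (PySem.List.pyGetD code_list j "")))
    then false else true

-- ===== PORT B =====
-- literal port of Source B: vals = sorted(codes.values()) (Python string order = lexicographic order
-- on .toList, per the PySem convention), then all(not b.startswith(a) for a, b in zip(vals, vals[1:]))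
def is_valid_huffman_code_alt (codes : List (String × String)) : Bool :=
  let vals := PySem.List.sorted (codes.map (fun kv => kv.2)) (fun s => s.toList) false
  (vals.zip (vals.drop 1)).all (fun ab => !(PySem.Str.startswith ab.2 ab.1))

-- ===== PRECONDITION & SPEC =====
-- Pre_ excludes association lists with duplicate keys: they do not denote a Python dict (A's
-- argument is a dict), since building the dict collapses duplicate keys and drops earlier values.
def Pre_is_valid_huffman_code (codes : List (String × String)) : Prop :=
  (codes.map (fun kv => kv.1)).Nodup
instance (codes : List (String × String)) : Decidable (Pre_is_valid_huffman_code codes) := by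
  unfold Pre_is_valid_huffman_code; infer_instance
def pvWitness_is_valid_huffman_code : (List (String × String)) := [("a", "0"), ("b", "10"), ("c", "11")]
def Spec_is_valid_huffman_code (codes : List (String × String)) (out : Bool) : Prop := out = is_valid_huffman_code_alt codes
instance (codes : List (String × String)) (out : Bool) : Decidable (Spec_is_valid_huffman_code codes out) := by unfold Spec_is_valid_huffman_code; infer_instance

-- ===== CLAIM (what is proved, stated in full; the proofs are below) =====
def Claim_equal_is_valid_huffman_code : Prop := ∀ (codes : List (String × String)), Dom_is_valid_huffman_code codes → Pre_is_valid_huffman_code codes → Spec_is_valid_huffman_code codes (is_valid_huffman_code codes)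

-- ===== LEMMAS AND PROOFS =====

-- the symmetric "no prefix either way" relation that A's double loop checks for all pairs
def pvNoPref (x y : String) : Prop := ¬ (x.toList <+: y.toList) ∧ ¬ (y.toList <+: x.toList)

theorem pvNoPref_symm : ∀ {x y : String}, pvNoPref x y → pvNoPref y x := by
  intro x y h; exact ⟨h.2, h.1⟩

-- the sorted value list B works on
def pvS (vals : List String) : List String :=
  PySem.List.sorted vals (fun s : String => s.toList) false

-- pvS with the LinearOrder instances of List Char (same function; Decidable is a subsingleton)
theorem pvS_eq (vals : List String) : pvS vals =
    @PySem.List.sorted String (List Char)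
      (@Preorder.toLT _ (@PartialOrder.toPreorder _ (@LinearOrder.toPartialOrder _ inferInstance)))
      (@LinearOrder.toDecidableLT _ inferInstance) vals (fun s : String => s.toList) false := by
  unfold pvS
  congr 1

-- pvS is sorted: its entries are lexicographically monotone in the index
theorem pvMono (vals : List String) (p q : Nat) (hpq : p ≤ q) (hq : q < (pvS vals).length) :
    ((pvS vals)[p]'(by omega)).toList ≤ ((pvS vals)[q]'hq).toList := by
  have h := pvS_eq vals
  have hq' : q < (@PySem.List.sorted String (List Char)
      (@Preorder.toLT _ (@PartialOrder.toPreorder _ (@LinearOrder.toPartialOrder _ inferInstance)))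
      (@LinearOrder.toDecidableLT _ inferInstance) vals (fun s : String => s.toList) false).length := by
    rw [← h]; exact hq
  have := PySem.List.key_sorted_getElem_mono vals (fun s : String => s.toList) hpq hq'
  simpa [← h] using this

-- if Lex p z and p is not a prefix of z, any extension of p is still Lex-below z
theorem pvLex_append (p z : List Char) (h : List.Lex (· < ·) p z) (hnp : ¬ p <+: z)
    (r : List Char) : List.Lex (· < ·) (p ++ r) z := by
  induction h with
  | nil => exact absurd (List.nil_prefix) hnp
  | @rel a l b l' hab => exact List.Lex.rel hab
  | @cons a l l' h ih =>
      exact List.Lex.cons (ih (fun hp => hnp (List.cons_prefix_cons.mpr ⟨rfl, hp⟩)))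

theorem pvLex_append_cons (p : List Char) (c : Char) (r : List Char) :
    List.Lex (· < ·) p (p ++ c :: r) := by
  induction p with
  | nil => exact List.Lex.nil
  | cons a t ih => exact List.Lex.cons ih

-- a prefix is lexicographically ≤ the whole word
theorem pvPrefix_le {p z : List Char} (h : p <+: z) : p ≤ z := by
  obtain ⟨r, rfl⟩ := h
  cases r with
  | nil => exact le_of_eq (by simp)
  | cons c r => exact le_of_lt (pvLex_append_cons p c r : p < p ++ c :: r)

-- a prefix of y is a prefix of every z lexicographically between p and y
theorem pvPref_between {p z y : List Char} (h1 : p ≤ z) (h2 : z ≤ y) (hp : p <+: y) :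
    p <+: z := by
  by_contra hnp
  have hlt : p < z := lt_of_le_of_ne h1 (fun e => hnp (e ▸ List.prefix_refl p))
  obtain ⟨r, rfl⟩ := hp
  exact absurd (lt_of_lt_of_le (pvLex_append p z hlt hnp r : (p ++ r) < z) h2)
    (lt_irrefl _)

-- A = true iff the values are pairwise prefix-free
theorem pvA_iff (codes : List (String × String)) :
    is_valid_huffman_code codes = true ↔
      (codes.map (fun kv => kv.2)).Pairwise pvNoPref := by
  unfold is_valid_huffman_code
  by_cases hnil : codes = []
  · simp [hnil]
  · simp only [hnil, if_false]
    set vals := codes.map (fun kv => kv.2) with hv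
    have hexp : ((PySem.List.pyRange 0 (PySem.List.len vals) 1).any (fun i =>
         (PySem.List.pyRange 0 (PySem.List.len vals) 1).any (fun j =>
           decide (i ≠ j) && PySem.Str.startswith (PySem.List.pyGetD vals i "")
             (PySem.List.pyGetD vals j "")))) = true ↔
        ∃ i, ∃ (_ : i < vals.length), ∃ j, ∃ (_ : j < vals.length), i ≠ j ∧
          (vals[j].toList <+: vals[i].toList) := by
      rw [PySem.List.len_eq, PySem.List.pyRange_zero_natCast, List.any_map, List.any_eq_true]
      constructor
      · rintro ⟨i, hi, hinner⟩
        rw [Function.comp_apply, List.any_map, List.any_eq_true] at hinner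
        obtain ⟨j, hj, hcond⟩ := hinner
        rw [List.mem_range] at hi hj
        rw [Function.comp_apply, Bool.and_eq_true, decide_eq_true_iff] at hcond
        refine ⟨i, hi, j, hj, fun e => hcond.1 (by simp [e]), ?_⟩
        have := hcond.2
        rw [PySem.List.pyGetD_natCast, PySem.List.pyGetD_natCast,
          List.getD_eq_getElem _ _ hi, List.getD_eq_getElem _ _ hj,
          PySem.Str.startswith_eq, PySem.Chars.startswith_iff] at this
        exact this
      · rintro ⟨i, hi, j, hj, hne, hp⟩
        refine ⟨i, List.mem_range.mpr hi, ?_⟩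
        rw [Function.comp_apply, List.any_map, List.any_eq_true]
        refine ⟨j, List.mem_range.mpr hj, ?_⟩
        rw [Function.comp_apply, Bool.and_eq_true, decide_eq_true_iff]
        refine ⟨fun e => hne (by exact_mod_cast e), ?_⟩
        rw [PySem.List.pyGetD_natCast, PySem.List.pyGetD_natCast,
          List.getD_eq_getElem _ _ hi, List.getD_eq_getElem _ _ hj,
          PySem.Str.startswith_eq, PySem.Chars.startswith_iff]
        exact hp
    have hpw : (¬ ∃ i, ∃ (_ : i < vals.length), ∃ j, ∃ (_ : j < vals.length), i ≠ j ∧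
        (vals[j].toList <+: vals[i].toList)) ↔ vals.Pairwise pvNoPref := by
      rw [List.pairwise_iff_getElem]
      constructor
      · intro hne i j hi hj hij
        exact ⟨fun hp => hne ⟨j, hj, i, hi, by omega, hp⟩,
               fun hp => hne ⟨i, hi, j, hj, by omega, hp⟩⟩
      · rintro hall ⟨i, hi, j, hj, hne, hp⟩
        rcases Nat.lt_or_ge i j with hlt | hge
        · exact (hall i j hi hj hlt).2 hp
        · exact (hall j i hj hi (by omega)).1 hp
    cases hb : ((PySem.List.pyRange 0 (PySem.List.len vals) 1).any (fun i =>
         (PySem.List.pyRange 0 (PySem.List.len vals) 1).any (fun j =>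
           decide (i ≠ j) && PySem.Str.startswith (PySem.List.pyGetD vals i "")
             (PySem.List.pyGetD vals j "")))) with
    | false =>
        rw [show (if ((false : Bool) = true) then false else true) = true from rfl]
        exact iff_of_true rfl (hpw.mp (fun hx => by rw [← hexp, hb] at hx; cases hx))
    | true =>
        rw [show (if ((true : Bool) = true) then false else true) = false from rfl]
        exact iff_of_false (by simp) (fun hc => absurd (hexp.mp hb) (hpw.mpr hc))

-- the adjacent-pair check of B, characterised over any list
theorem pvZipAdj (s : List String) :
    (s.zip (s.drop 1)).all (fun ab => !(PySem.Str.startswith ab.2 ab.1)) = true ↔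
      ∀ (k : Nat) (h : k + 1 < s.length), ¬ (s[k].toList <+: s[k+1].toList) := by
  rw [List.all_eq_true]
  constructor
  · intro hall k hk
    have hk' : k < (s.zip (s.drop 1)).length := by
      simp [List.length_zip]; omega
    have := hall _ (List.getElem_mem hk')
    rw [List.getElem_zip] at this
    simp only [List.getElem_drop, Nat.add_comm 1] at this
    simp only [Bool.not_eq_eq_eq_not, Bool.not_true, ← Bool.not_eq_true] at this
    rw [PySem.Str.startswith_eq] at this
    intro hp
    exact this (by simp [PySem.Chars.startswith_iff, hp])
  · intro h ab hab
    rw [List.mem_iff_getElem] at hab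
    obtain ⟨k, hk, rfl⟩ := hab
    have hk1 : k + 1 < s.length := by
      simp [List.length_zip] at hk; omega
    rw [List.getElem_zip]
    simp only [List.getElem_drop, Nat.add_comm 1]
    simp only [Bool.not_eq_eq_eq_not, Bool.not_true, ← Bool.not_eq_true]
    rw [PySem.Str.startswith_eq]
    intro hsw
    exact h k hk1 ((PySem.Chars.startswith_iff _ _).mp hsw)

-- B = true iff no adjacent pair of the sorted values is a prefix pair
theorem pvB_iff (codes : List (String × String)) :
    is_valid_huffman_code_alt codes = true ↔
      ∀ (k : Nat) (h : k + 1 < (pvS (codes.map (fun kv => kv.2))).length),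
        ¬ ((pvS (codes.map (fun kv => kv.2)))[k].toList <+:
           (pvS (codes.map (fun kv => kv.2)))[k+1].toList) := by
  unfold is_valid_huffman_code_alt pvS
  exact pvZipAdj _

-- on the sorted list, adjacent prefix-freeness already gives pairwise prefix-freeness
theorem pvSorted_adj (vals : List String) :
    (pvS vals).Pairwise pvNoPref ↔
      ∀ (k : Nat) (h : k + 1 < (pvS vals).length),
        ¬ ((pvS vals)[k].toList <+: (pvS vals)[k+1].toList) := by
  constructor
  · intro hpw k hk
    exact ((List.pairwise_iff_getElem.mp hpw) k (k+1) (by omega) hk (by omega)).1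
  · intro hadj
    rw [List.pairwise_iff_getElem]
    intro i j hi hj hij
    have case1 : ¬ ((pvS vals)[i].toList <+: (pvS vals)[j].toList) := by
      intro hp
      exact hadj i (by omega)
        (pvPref_between (pvMono vals i (i+1) (by omega) (by omega))
          (pvMono vals (i+1) j (by omega) hj) hp)
    refine ⟨case1, fun hp => ?_⟩
    have heq : (pvS vals)[j].toList = (pvS vals)[i].toList :=
      le_antisymm (pvPrefix_le hp) (pvMono vals i j (by omega) hj)
    exact case1 (heq ▸ hp)

-- ===== VERDICT (by name: the statement is the Claim_ definition above) =====
theorem is_valid_huffman_code_spec : Claim_equal_is_valid_huffman_code := by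
  intro codes _ _
  unfold Spec_is_valid_huffman_code
  rw [Bool.eq_iff_iff, pvA_iff, pvB_iff, ← pvSorted_adj]
  exact List.Perm.pairwise_iff pvNoPref_symm
    (PySem.List.sorted_perm (codes.map (fun kv => kv.2)) (fun s : String => s.toList) false).symm
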